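-- pv_equiv track=rewrite | github.com/miliar/Code_Jam_Webscraper | Solutions_in_python/Problem_202/Fashion.py | solveXs
-- ===== SOURCE A (Python) =====
-- def solveXs(Xs):
--     n = len(Xs)
--     avail_row = [ True for _ in range(n)]
--     avail_col = [ True for _ in range(n)]
--     Xss = [ ['.' for _ in range(n)] for _ in range(n)]
--     for r in range(n):
--         for c in range(n):
--             if Xs[r][c] == 'x':
--                 Xss[r][c] = 'x'
--                 avail_row[r] = False
--                 avail_col[c] = False
--     for r in range(n):
--         for c in range(n):
--             if Xss[r][c] == '.' and avail_row[r] and avail_col[c]: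
--                 Xss[r][c] = 'x'
--                 avail_row[r] = False
--                 avail_col[c] = False
--     return Xss
-- ===== SOURCE B (Python) =====
-- def solveXs(Xs):
--     n = len(Xs)
--     Xss = [['x' if Xs[r][c] == 'x' else '.' for c in range(n)] for r in range(n)]
--     free_rows = [r for r in range(n) if all(Xss[r][c] != 'x' for c in range(n))]
--     free_cols = [c for c in range(n) if all(Xss[r][c] != 'x' for r in range(n))]
--     for r, c in zip(free_rows, free_cols):
--         Xss[r][c] = 'x'
--     return Xss
-- ===== Notes on version B (the rewrite author's own statement) =====
-- stated objective: simpler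
-- what changed: Replaces A's quadratic second pass (a nested row-by-column scan with availability flags and per-cell branches) by collecting the free row indices and free column indices once and pairing them directly with zip, setting one 'x' per pair; the grid is built by a comprehension instead of in-place flag bookkeeping.
import Mathlib
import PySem

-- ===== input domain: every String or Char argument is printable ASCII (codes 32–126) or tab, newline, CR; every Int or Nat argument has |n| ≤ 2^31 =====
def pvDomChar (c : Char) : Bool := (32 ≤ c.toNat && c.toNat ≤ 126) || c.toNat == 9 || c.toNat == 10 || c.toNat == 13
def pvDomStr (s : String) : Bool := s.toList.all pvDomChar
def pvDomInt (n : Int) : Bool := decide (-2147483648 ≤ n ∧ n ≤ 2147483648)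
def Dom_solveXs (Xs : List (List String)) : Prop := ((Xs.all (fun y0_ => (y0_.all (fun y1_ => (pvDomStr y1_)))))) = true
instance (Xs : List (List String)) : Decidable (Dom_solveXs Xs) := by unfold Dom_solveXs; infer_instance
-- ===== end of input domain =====

-- One honest line: B replaces A's nested second-pass greedy scan with a direct zip of the
-- free-row indices against the free-column indices (objective: simpler); return values agree on Pre_.

-- ===== PORT A =====
-- shared helpers: Python's `g[r][c]` read and `g[r][c] = v` write (exact for in-range indices;
-- Pre_solveXs below restricts to inputs where every index Python uses is in range)
def pvCell (g : List (List String)) (r c : Nat) : String := (g.getD r []).getD c ""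
def pvSet2 (g : List (List String)) (r c : Nat) (v : String) : List (List String) :=
  g.set r ((g.getD r []).set c v)

-- body of A's first pass: `if Xs[r][c] == 'x': Xss[r][c]='x'; avail_row[r]=False; avail_col[c]=False`
def pvP1c (Xs : List (List String)) (r : Nat)
    (st : List (List String) × List Bool × List Bool) (c : Nat) :
    List (List String) × List Bool × List Bool :=
  if pvCell Xs r c == "x" then (pvSet2 st.1 r c "x", st.2.1.set r false, st.2.2.set c false) else st

def pvP1r (Xs : List (List String)) (n : Nat)
    (st : List (List String) × List Bool × List Bool) (r : Nat) :
    List (List String) × List Bool × List Bool :=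
  (List.range n).foldl (pvP1c Xs r) st

-- body of A's second pass: `if Xss[r][c] == '.' and avail_row[r] and avail_col[c]: …`
def pvP2c (r : Nat) (st : List (List String) × List Bool × List Bool) (c : Nat) :
    List (List String) × List Bool × List Bool :=
  if pvCell st.1 r c == "." && st.2.1.getD r false && st.2.2.getD c false then
    (pvSet2 st.1 r c "x", st.2.1.set r false, st.2.2.set c false)
  else st

def pvP2r (n : Nat) (st : List (List String) × List Bool × List Bool) (r : Nat) :
    List (List String) × List Bool × List Bool :=
  (List.range n).foldl (pvP2c r) st

def solveXs (Xs : List (List String)) : List (List String) :=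
  let n := Xs.length
  let init : List (List String) × List Bool × List Bool :=
    ((List.range n).map (fun _ => (List.range n).map (fun _ => ".")),
     (List.range n).map (fun _ => true),
     (List.range n).map (fun _ => true))
  let s1 := (List.range n).foldl (pvP1r Xs n) init
  ((List.range n).foldl (pvP2r n) s1).1

-- ===== PORT B =====
def solveXs_alt (Xs : List (List String)) : List (List String) :=
  let n := Xs.length
  let Xss := (List.range n).map (fun r => (List.range n).map (fun c =>
    if pvCell Xs r c == "x" then "x" else "."))
  let freeRows := (List.range n).filter (fun r =>
    (List.range n).all (fun c => !(pvCell Xss r c == "x")))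
  let freeCols := (List.range n).filter (fun c =>
    (List.range n).all (fun r => !(pvCell Xss r c == "x")))
  (freeRows.zip freeCols).foldl (fun g rc => pvSet2 g rc.1 rc.2 "x") Xss

-- ===== PRECONDITION & SPEC =====
-- Pre_ excludes exactly the inputs where Python A raises IndexError: some row shorter than the
-- number of rows (A reads Xs[r][c] for all r, c < len(Xs)). The Lean ports are total (getD),
-- so the equivalence proof below does not consume this hypothesis; Pre_ is where the ports are
-- faithful to the two Pythons (which both raise outside it).
def Pre_solveXs (Xs : List (List String)) : Prop := ∀ row ∈ Xs, Xs.length ≤ row.length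
instance (Xs : List (List String)) : Decidable (Pre_solveXs Xs) := by
  unfold Pre_solveXs; infer_instance
def pvWitness_solveXs : List (List String) := [["x", "."], [".", "."]]

def Spec_solveXs (Xs : List (List String)) (out : List (List String)) : Prop := out = solveXs_alt Xs
instance (Xs : List (List String)) (out : List (List String)) : Decidable (Spec_solveXs Xs out) := by
  unfold Spec_solveXs; infer_instance

-- ===== CLAIM (what is proved, stated in full; the proofs are below) =====
def Claim_equal_solveXs : Prop :=
  ∀ (Xs : List (List String)), Dom_solveXs Xs → Pre_solveXs Xs → Spec_solveXs Xs (solveXs Xs)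

-- ===== LEMMAS AND PROOFS =====

-- proof-side abbreviations
def pvB0 (Xs : List (List String)) : List (List String) :=
  (List.range Xs.length).map (fun r => (List.range Xs.length).map (fun c =>
    if pvCell Xs r c == "x" then "x" else "."))
def pvFR (Xs : List (List String)) (r : Nat) : Bool :=
  (List.range Xs.length).all (fun c => !(pvCell Xs r c == "x"))
def pvFC (Xs : List (List String)) (c : Nat) : Bool :=
  (List.range Xs.length).all (fun r => !(pvCell Xs r c == "x"))
def pvZF (Xs : List (List String)) (pairs : List (Nat × Nat)) : List (List String) :=
  pairs.foldl (fun g rc => pvSet2 g rc.1 rc.2 "x") (pvB0 Xs)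

-- generic list facts
theorem pv_getElem?_set_map {α : Type} (a : List α) (i : Nat) (v : α) :
    (a.set i v)[i]? = a[i]?.map fun _ => v := by
  by_cases h : i < a.length
  · simp [List.getElem?_set_self h, List.getElem?_eq_getElem h]
  · simp [List.getElem?_eq_none_iff.mpr (by omega : a.length ≤ i),
      List.getElem?_eq_none_iff.mpr (by simp; omega : (a.set i v).length ≤ i)]

theorem pv_getD_set_ne {α : Type} (a : List α) (i j : Nat) (v d : α) (h : i ≠ j) :
    (a.set i v).getD j d = a.getD j d := by
  rw [List.getD_eq_getElem?_getD, List.getD_eq_getElem?_getD, List.getElem?_set_ne h]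

theorem pv_getD_set_false_self (a : List Bool) (i : Nat) :
    (a.set i false).getD i false = false := by
  rw [List.getD_eq_getElem?_getD, pv_getElem?_set_map]
  cases a[i]? <;> rfl

theorem pv_set_getD_self {α : Type} (l : List α) (r : Nat) (d : α) :
    l.set r (l.getD r d) = l := by
  by_cases h : r < l.length
  · rw [List.getD_eq_getElem l d h]; exact List.set_getElem_self h
  · rw [List.set_eq_of_length_le (by omega)]

theorem pv_all_congr (l : List Nat) (p q : Nat → Bool) (h : ∀ x ∈ l, p x = q x) :
    l.all p = l.all q := by
  induction l with
  | nil => rfl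
  | cons x l ih =>
      simp [List.all_cons, h x (by simp), ih (fun y hy => h y (by simp [hy]))]

theorem pv_find?_congr {α : Type} (l : List α) (p q : α → Bool) (h : ∀ x ∈ l, p x = q x) :
    l.find? p = l.find? q := by
  rw [← List.head?_filter, ← List.head?_filter, List.filter_congr h]


theorem pv_contains_false {α : Type} [BEq α] [LawfulBEq α] (l : List α) (x : α) (h : x ∉ l) :
    l.contains x = false := by simpa using h

theorem pv_contains_cons_ne {α : Type} [BEq α] [LawfulBEq α] (l : List α) (x y : α) (h : x ≠ y) :
    (y :: l).contains x = l.contains x := by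
  have hxy : (x == y) = false := by simpa using h
  simp only [List.contains_cons, hxy, Bool.false_or]

theorem pv_contains_range (n i : Nat) : (List.range n).contains i = decide (i < n) := by
  by_cases h : i < n <;> simp [List.mem_range, h]

theorem pv_foldl_set_getElem? {α : Type} (p : Nat → Bool) (v : α) :
    ∀ (l : List Nat) (a : List α) (i : Nat),
      (l.foldl (fun a c => if p c then a.set c v else a) a)[i]? =
        if l.contains i && p i then a[i]?.map (fun _ => v) else a[i]? := by
  intro l
  induction l with
  | nil => intro a i; simp
  | cons c l ih =>
      intro a i
      rw [List.foldl_cons]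
      by_cases hp : p c
      · rw [if_pos hp, ih]
        by_cases hci : c = i
        · subst hci
          rw [pv_getElem?_set_map]
          have hr : ((c :: l).contains c && p c) = true := by simp [hp]
          rw [hr, if_pos rfl]
          split <;> cases a[c]? <;> rfl
        · rw [List.getElem?_set_ne hci, pv_contains_cons_ne _ _ _ (Ne.symm hci)]
      · rw [if_neg hp, ih]
        by_cases hci : c = i
        · subst hci
          have h2 : ((c :: l).contains c && p c) = (l.contains c && p c) := by simp [hp]
          rw [h2]
        · rw [pv_contains_cons_ne _ _ _ (Ne.symm hci)]

theorem pv_foldl_set_const {α : Type} (r : Nat) (v : α) (p : Nat → Bool) :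
    ∀ (l : List Nat) (a : List α),
      (l.foldl (fun a c => if p c then a.set r v else a) a) =
        if l.any p then a.set r v else a := by
  intro l
  induction l with
  | nil => intro a; simp
  | cons c l ih =>
      intro a
      rw [List.foldl_cons]
      by_cases hp : p c
      · rw [if_pos hp, ih]
        by_cases hl : l.any p <;> simp [hl, List.any_cons, hp, List.set_set]
      · rw [if_neg hp, ih]
        simp [List.any_cons, hp]

theorem pv_row_split (p : Nat → Bool) (r : Nat) :
    ∀ (cs : List Nat) (g : List (List String)),
      cs.foldl (fun g c => if p c then pvSet2 g r c "x" else g) g =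
        g.set r (cs.foldl (fun a c => if p c then a.set c "x" else a) (g.getD r [])) := by
  intro cs
  induction cs with
  | nil => intro g; rw [List.foldl_nil, List.foldl_nil, pv_set_getD_self]
  | cons c cs ih =>
      intro g
      rw [List.foldl_cons, List.foldl_cons]
      by_cases hp : p c
      · rw [if_pos hp, if_pos hp, ih]
        unfold pvSet2
        by_cases hr : r < g.length
        · have hrow : (g.set r ((g.getD r []).set c "x")).getD r [] = (g.getD r []).set c "x" := by
            rw [List.getD_eq_getElem?_getD, pv_getElem?_set_map, List.getElem?_eq_getElem hr]
            rfl
          rw [hrow, List.set_set]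
        · have hg : ∀ row : List String, g.set r row = g := fun row =>
            List.set_eq_of_length_le (by omega)
          rw [hg, hg, hg]
      · rw [if_neg hp, if_neg hp, ih]

theorem pv_rowupd_fold_getElem? (F : Nat → List String → List String) :
    ∀ (l : List Nat), l.Nodup → ∀ (g : List (List String)) (i : Nat),
      (l.foldl (fun g r => g.set r (F r (g.getD r []))) g)[i]? =
        if l.contains i then (g[i]?).map (F i) else g[i]? := by
  intro l
  induction l with
  | nil => intro _ g i; simp
  | cons r l ih =>
      intro hnd g i
      have hrl : r ∉ l := (List.nodup_cons.mp hnd).1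
      rw [List.foldl_cons, ih (List.nodup_cons.mp hnd).2]
      by_cases hri : r = i
      · subst hri
        rw [pv_contains_false l r hrl]
        simp only [Bool.false_eq_true, if_false, pv_getElem?_set_map]
        have hc : (r :: l).contains r = true := by simp
        rw [hc, if_pos rfl]
        by_cases h : r < g.length
        · rw [List.getElem?_eq_getElem h, List.getD_eq_getElem _ _ h]
          rfl
        · rw [List.getElem?_eq_none_iff.mpr (by omega)]
          rfl
      · rw [List.getElem?_set_ne hri, pv_contains_cons_ne _ _ _ (Ne.symm hri)]

theorem pv_zip_snoc_of_le {α β : Type} (x : α) :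
    ∀ (l1 : List α) (l2 : List β), l2.length ≤ l1.length → (l1 ++ [x]).zip l2 = l1.zip l2 := by
  intro l1
  induction l1 with
  | nil =>
      intro l2 h
      have : l2 = [] := List.eq_nil_of_length_eq_zero (by simpa using h)
      subst this; simp
  | cons a l1 ih =>
      intro l2 h
      cases l2 with
      | nil => simp
      | cons b l2 => simp [List.zip_cons_cons, ih l2 (by simpa using h)]

theorem pv_zip_snoc_of_drop {α β : Type} (x : α) (c0 : β) (rest : List β) :
    ∀ (l1 : List α) (l2 : List β), l2.drop l1.length = c0 :: rest →
      (l1 ++ [x]).zip l2 = l1.zip l2 ++ [(x, c0)] := by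
  intro l1
  induction l1 with
  | nil =>
      intro l2 h
      simp at h; subst h; simp [List.zip_cons_cons]
  | cons a l1 ih =>
      intro l2 h
      cases l2 with
      | nil => simp at h
      | cons b l2 =>
          simp only [List.length_cons, List.drop_succ_cons] at h
          simp [List.zip_cons_cons, ih l2 h]

-- pass-2 inner-loop shape
theorem pv_p2_dead (r : Nat) :
    ∀ (cs : List Nat) (g : List (List String)) (ar ac : List Bool),
      ar.getD r false = false → cs.foldl (pvP2c r) (g, ar, ac) = (g, ar, ac) := by
  intro cs
  induction cs with
  | nil => intro g ar ac _; rfl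
  | cons c cs ih =>
      intro g ar ac h
      rw [List.foldl_cons]
      have hcond : (pvCell g r c == "." && ar.getD r false && ac.getD c false) = false := by
        rw [h]
        cases (pvCell g r c == ".") <;> simp
      have hstep : pvP2c r (g, ar, ac) c = (g, ar, ac) := by
        simp only [pvP2c]
        rw [hcond]
        rfl
      rw [hstep, ih g ar ac h]

theorem pv_p2_run (r : Nat) :
    ∀ (cs : List Nat) (g : List (List String)) (ar ac : List Bool),
      ar.getD r false = true →
      cs.foldl (pvP2c r) (g, ar, ac) =
        match cs.find? (fun c => pvCell g r c == "." && ac.getD c false) with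
        | some c0 => (pvSet2 g r c0 "x", ar.set r false, ac.set c0 false)
        | none => (g, ar, ac) := by
  intro cs
  induction cs with
  | nil => intro g ar ac _; rfl
  | cons c cs ih =>
      intro g ar ac h
      rw [List.foldl_cons]
      by_cases hc : (pvCell g r c == "." && ac.getD c false) = true
      · have hcond : (pvCell g r c == "." && ar.getD r false && ac.getD c false) = true := by
          simp only [Bool.and_eq_true] at hc
          rw [h, hc.1, hc.2]
          rfl
        have hstep : pvP2c r (g, ar, ac) c = (pvSet2 g r c "x", ar.set r false, ac.set c false) := by
          simp only [pvP2c]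
          rw [hcond]
          rfl
        rw [hstep, pv_p2_dead r cs _ _ _ (pv_getD_set_false_self ar r),
          show List.find? (fun c => pvCell g r c == "." && ac.getD c false) (c :: cs) = some c from
            List.find?_cons_of_pos hc]
      · have hcond : (pvCell g r c == "." && ar.getD r false && ac.getD c false) = false := by
          rw [h]
          revert hc
          cases (pvCell g r c == ".") <;> cases (ac.getD c false) <;> simp
        have hstep : pvP2c r (g, ar, ac) c = (g, ar, ac) := by
          simp only [pvP2c]
          rw [hcond]
          rfl
        rw [hstep, ih g ar ac h,
          show List.find? (fun c => pvCell g r c == "." && ac.getD c false) (c :: cs) =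
              List.find? (fun c => pvCell g r c == "." && ac.getD c false) cs from
            List.find?_cons_of_neg (by simpa using hc)]

theorem pv_zf_cell_untouched (r c : Nat) :
    ∀ (pairs : List (Nat × Nat)) (g : List (List String)),
      (∀ rc ∈ pairs, rc.1 ≠ r) →
      pvCell ((pairs.foldl (fun g rc => pvSet2 g rc.1 rc.2 "x") g)) r c = pvCell g r c := by
  intro pairs
  induction pairs with
  | nil => intro g _; rfl
  | cons rc pairs ih =>
      intro g h
      rw [List.foldl_cons, ih _ (fun x hx => h x (by simp [hx]))]
      unfold pvCell pvSet2
      rw [pv_getD_set_ne _ _ _ _ _ (h rc (by simp))]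

-- first pass, split into its three independent components
theorem pv_s1_split (Xs : List (List String)) (n : Nat)
    (g0 : List (List String)) (ar0 ac0 : List Bool) :
    (List.range n).foldl (pvP1r Xs n) (g0, ar0, ac0) =
      ((List.range n).foldl (fun g r => (List.range n).foldl
          (fun g c => if pvCell Xs r c == "x" then pvSet2 g r c "x" else g) g) g0,
       (List.range n).foldl (fun a r => (List.range n).foldl
          (fun a c => if pvCell Xs r c == "x" then a.set r false else a) a) ar0,
       (List.range n).foldl (fun a r => (List.range n).foldl
          (fun a c => if pvCell Xs r c == "x" then a.set c false else a) a) ac0) := by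
  have hsplit : ∀ r, pvP1c Xs r = fun (st : List (List String) × List Bool × List Bool) c =>
      ((fun g c => if pvCell Xs r c == "x" then pvSet2 g r c "x" else g) st.1 c,
       (fun (pr : List Bool × List Bool) c =>
         ((fun a c => if pvCell Xs r c == "x" then a.set r false else a) pr.1 c,
          (fun a c => if pvCell Xs r c == "x" then a.set c false else a) pr.2 c)) st.2 c) := by
    intro r
    funext st c
    obtain ⟨g, ar, ac⟩ := st
    by_cases h : pvCell Xs r c == "x" <;> simp [pvP1c, h]
  have hrow : pvP1r Xs n = fun (st : List (List String) × List Bool × List Bool) r =>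
      ((List.range n).foldl (fun g c => if pvCell Xs r c == "x" then pvSet2 g r c "x" else g) st.1,
       ((List.range n).foldl (fun a c => if pvCell Xs r c == "x" then a.set r false else a) st.2.1,
        (List.range n).foldl (fun a c => if pvCell Xs r c == "x" then a.set c false else a) st.2.2)) := by
    funext st r
    obtain ⟨g, ar, ac⟩ := st
    show (List.range n).foldl (pvP1c Xs r) (g, ar, ac) = _
    rw [hsplit r]
    refine (PySem.List.foldl_prod_mk
      (fun g c => if pvCell Xs r c == "x" then pvSet2 g r c "x" else g)
      (fun (pr : List Bool × List Bool) c =>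
        ((if pvCell Xs r c == "x" then pr.1.set r false else pr.1),
         (if pvCell Xs r c == "x" then pr.2.set c false else pr.2)))
      (List.range n) g (ar, ac)).trans ?_
    exact congrArg (Prod.mk _) (PySem.List.foldl_prod_mk
      (fun (a : List Bool) c => if pvCell Xs r c == "x" then a.set r false else a)
      (fun (a : List Bool) c => if pvCell Xs r c == "x" then a.set c false else a)
      (List.range n) ar ac)
  rw [hrow]
  refine (PySem.List.foldl_prod_mk
    (fun (g : List (List String)) r => (List.range n).foldl
      (fun g c => if pvCell Xs r c == "x" then pvSet2 g r c "x" else g) g)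
    (fun (pr : List Bool × List Bool) r =>
      ((List.range n).foldl (fun a c => if pvCell Xs r c == "x" then a.set r false else a) pr.1,
       (List.range n).foldl (fun a c => if pvCell Xs r c == "x" then a.set c false else a) pr.2))
    (List.range n) g0 (ar0, ac0)).trans ?_
  exact congrArg (Prod.mk _) (PySem.List.foldl_prod_mk
    (fun (a : List Bool) r => (List.range n).foldl
      (fun a c => if pvCell Xs r c == "x" then a.set r false else a) a)
    (fun (a : List Bool) r => (List.range n).foldl
      (fun a c => if pvCell Xs r c == "x" then a.set c false else a) a)
    (List.range n) ar0 ac0)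

theorem pv_G1_eq_B0 (Xs : List (List String)) :
    (List.range Xs.length).foldl (fun g r => (List.range Xs.length).foldl
        (fun g c => if pvCell Xs r c == "x" then pvSet2 g r c "x" else g) g)
      ((List.range Xs.length).map (fun _ => (List.range Xs.length).map (fun _ => "."))) =
      pvB0 Xs := by
  have hF : (fun (g : List (List String)) (r : Nat) => (List.range Xs.length).foldl
      (fun g c => if pvCell Xs r c == "x" then pvSet2 g r c "x" else g) g) =
      fun g r => g.set r ((List.range Xs.length).foldl
        (fun a c => if pvCell Xs r c == "x" then a.set c "x" else a) (g.getD r [])) := by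
    funext g r
    exact pv_row_split (fun c => pvCell Xs r c == "x") r (List.range Xs.length) g
  rw [hF]
  apply List.ext_getElem?
  intro i
  refine (pv_rowupd_fold_getElem?
    (fun r row => (List.range Xs.length).foldl
      (fun a c => if pvCell Xs r c == "x" then a.set c "x" else a) row)
    (List.range Xs.length) (List.nodup_range) _ i).trans ?_
  by_cases hi : i < Xs.length
  · have hct : (List.range Xs.length).contains i = true := by
      simp [List.mem_range]; omega
    rw [hct, if_pos rfl]
    rw [List.getElem?_map, List.getElem?_range hi]
    unfold pvB0
    rw [List.getElem?_map, List.getElem?_range hi]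
    simp only [Option.map_some]
    congr 1
    apply List.ext_getElem?
    intro c
    rw [pv_foldl_set_getElem?]
    by_cases hcn : c < Xs.length
    · rw [List.getElem?_map, List.getElem?_range hcn, List.getElem?_map, List.getElem?_range hcn]
      have hct2 : (List.range Xs.length).contains c = true := by
        simp [List.mem_range]; omega
      rw [hct2]
      by_cases hx : pvCell Xs i c = "x" <;> simp [hx]
    · rw [List.getElem?_eq_none_iff.mpr (by simpa using (by omega : Xs.length ≤ c)),
        List.getElem?_eq_none_iff.mpr (by simpa using (by omega : Xs.length ≤ c))]
      simp
  · have hct : (List.range Xs.length).contains i = false := by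
      simp [List.mem_range]; omega
    rw [hct]
    simp only [Bool.false_eq_true, if_false]
    rw [List.getElem?_eq_none_iff.mpr (by simpa using (by omega : Xs.length ≤ i)),
      List.getElem?_eq_none_iff.mpr]
    unfold pvB0
    simpa using (by omega : Xs.length ≤ i)

theorem pv_AR1_getD (Xs : List (List String)) (i : Nat) :
    ((List.range Xs.length).foldl (fun a r => (List.range Xs.length).foldl
        (fun a c => if pvCell Xs r c == "x" then a.set r false else a) a)
      ((List.range Xs.length).map (fun _ => true))).getD i false =
      (decide (i < Xs.length) && pvFR Xs i) := by
  have h1 : (fun (a : List Bool) (r : Nat) => (List.range Xs.length).foldl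
      (fun a c => if pvCell Xs r c == "x" then a.set r false else a) a) =
      fun a r => if (List.range Xs.length).any (fun c => pvCell Xs r c == "x") then
        a.set r false else a := by
    funext a r
    exact pv_foldl_set_const r false (fun c => pvCell Xs r c == "x") (List.range Xs.length) a
  rw [h1, List.getD_eq_getElem?_getD,
    pv_foldl_set_getElem? (fun r => (List.range Xs.length).any (fun c => pvCell Xs r c == "x")) false,
    pv_contains_range]
  have hfr : pvFR Xs i = !((List.range Xs.length).any (fun c => pvCell Xs i c == "x")) := by
    unfold pvFR
    rw [List.any_eq_not_all_not]
    simp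
  by_cases hi : i < Xs.length
  · have ha : ((List.range Xs.length).map (fun _ => true))[i]? = some true := by
      rw [List.getElem?_map, List.getElem?_range hi]
      rfl
    by_cases hx : (List.range Xs.length).any (fun c => pvCell Xs i c == "x") = true
    · simp [hi, hx, ha, hfr]
    · simp only [Bool.not_eq_true] at hx
      simp [hi, hx, ha, hfr]
  · have ha : ((List.range Xs.length).map (fun _ => true))[i]? = none := by
      rw [List.getElem?_eq_none_iff]
      simpa using (by omega : Xs.length ≤ i)
    simp [hi, ha]

theorem pv_AC1_getElem? (Xs : List (List String)) :
    ∀ (rs : List Nat) (a : List Bool) (i : Nat),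
      (rs.foldl (fun a r => (List.range Xs.length).foldl
          (fun a c => if pvCell Xs r c == "x" then a.set c false else a) a) a)[i]? =
        if rs.any (fun r => decide (i < Xs.length) && (pvCell Xs r i == "x")) then
          a[i]?.map (fun _ => false) else a[i]? := by
  intro rs
  induction rs with
  | nil => intro a i; simp
  | cons r rs ih =>
      intro a i
      rw [List.foldl_cons, ih, pv_foldl_set_getElem?]
      have hct : (List.range Xs.length).contains i = decide (i < Xs.length) := by
        by_cases hi : i < Xs.length <;>
          simp [List.contains_iff_mem, List.mem_range, hi]
      rw [hct, List.any_cons]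
      by_cases h1 : (decide (i < Xs.length) && (pvCell Xs r i == "x")) = true
      · rw [h1]
        simp only [Bool.true_or, if_pos rfl]
        by_cases h2 : rs.any (fun r => decide (i < Xs.length) && (pvCell Xs r i == "x")) = true <;>
          simp [h2, Option.map_map] <;> cases a[i]? <;> rfl
      · simp only [Bool.not_eq_true] at h1
        simp [h1]

theorem pv_AC1_getD (Xs : List (List String)) (c : Nat) :
    ((List.range Xs.length).foldl (fun a r => (List.range Xs.length).foldl
        (fun a c => if pvCell Xs r c == "x" then a.set c false else a) a)
      ((List.range Xs.length).map (fun _ => true))).getD c false =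
      (decide (c < Xs.length) && pvFC Xs c) := by
  rw [List.getD_eq_getElem?_getD, pv_AC1_getElem?]
  have hfc : pvFC Xs c = !((List.range Xs.length).any (fun r => pvCell Xs r c == "x")) := by
    unfold pvFC
    rw [List.any_eq_not_all_not]
    simp
  by_cases hc : c < Xs.length
  · have ha : ((List.range Xs.length).map (fun _ => true))[c]? = some true := by
      rw [List.getElem?_map, List.getElem?_range hc]; rfl
    by_cases hx : (List.range Xs.length).any (fun r => pvCell Xs r c == "x") = true
    · simp [hc, hx, ha, hfc]
    · simp only [Bool.not_eq_true] at hx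
      simp [hc, hx, ha, hfc]
  · have ha : ((List.range Xs.length).map (fun _ => true))[c]? = none := by
      rw [List.getElem?_eq_none_iff]; simpa using (by omega : Xs.length ≤ c)
    have : (List.range Xs.length).any
        (fun r => decide (c < Xs.length) && (pvCell Xs r c == "x")) = false := by
      simp [hc]
    simp [ha, hc]

theorem pv_B0_cell (Xs : List (List String)) (r c : Nat) (hr : r < Xs.length)
    (hc : c < Xs.length) :
    pvCell (pvB0 Xs) r c = if pvCell Xs r c == "x" then "x" else "." := by
  show ((pvB0 Xs).getD r []).getD c "" = _
  have hrow : (pvB0 Xs).getD r [] =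
      (List.range Xs.length).map (fun c => if pvCell Xs r c == "x" then "x" else ".") := by
    unfold pvB0
    rw [List.getD_eq_getElem?_getD, List.getElem?_map, List.getElem?_range hr]
    rfl
  rw [hrow, List.getD_eq_getElem?_getD, List.getElem?_map, List.getElem?_range hc]
  rfl

theorem pv_filter_range_succ (Xs : List (List String)) (k : Nat) :
    (List.range (k+1)).filter (pvFR Xs) =
      (List.range k).filter (pvFR Xs) ++ (if pvFR Xs k then [k] else []) := by
  rw [List.range_succ, List.filter_append]
  by_cases h : pvFR Xs k <;> simp [List.filter, h]

theorem pv_p2_main (Xs : List (List String)) :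
    ∀ (m k : Nat), k + m = Xs.length → ∀ (g : List (List String)) (ar ac : List Bool),
      g = pvZF Xs (((List.range k).filter (pvFR Xs)).zip
            ((List.range Xs.length).filter (pvFC Xs))) →
      (∀ i, k ≤ i → ar.getD i false = (decide (i < Xs.length) && pvFR Xs i)) →
      (List.range Xs.length).filter (fun c => ac.getD c false) =
        ((List.range Xs.length).filter (pvFC Xs)).drop
          ((((List.range k).filter (pvFR Xs)).zip
            ((List.range Xs.length).filter (pvFC Xs))).length) →
      ((List.range' k m).foldl (pvP2r Xs.length) (g, ar, ac)).1 =
        pvZF Xs (((List.range Xs.length).filter (pvFR Xs)).zip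
          ((List.range Xs.length).filter (pvFC Xs))) := by
  intro m
  induction m with
  | zero =>
      intro k hk g ar ac Hg Har Hac
      have hkn : k = Xs.length := by omega
      subst hkn
      simpa using Hg
  | succ m ih =>
      intro k hk g ar ac Hg Har Hac
      have hkn : k < Xs.length := by omega
      rw [List.range'_succ, List.foldl_cons]
      have hstate : pvP2r Xs.length (g, ar, ac) k =
          (List.range Xs.length).foldl (pvP2c k) (g, ar, ac) := rfl
      by_cases hfrk : pvFR Xs k = true
      · -- row k is a free row
        have harK : ar.getD k false = true := by
          rw [Har k le_rfl, hfrk]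
          simp [hkn]
        have hrun := pv_p2_run k (List.range Xs.length) g ar ac harK
        have hcellk : ∀ c ∈ List.range Xs.length, pvCell g k c = "." := by
          intro c hc
          have hcn : c < Xs.length := List.mem_range.mp hc
          rw [Hg]
          unfold pvZF
          rw [pv_zf_cell_untouched k c _ _ (by
            intro rc hrc
            have h1 := (List.of_mem_zip hrc).1
            have h2 : rc.1 < k := List.mem_range.mp (List.mem_filter.mp h1).1
            omega)]
          rw [pv_B0_cell Xs k c hkn hcn]
          have := List.all_eq_true.mp hfrk c hc
          simp only [Bool.not_eq_true'] at this
          rw [this]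
          rfl
        have hfind : (List.range Xs.length).find?
              (fun c => pvCell g k c == "." && ac.getD c false) =
            (List.range Xs.length).find? (fun c => ac.getD c false) := by
          apply pv_find?_congr
          intro c hc
          rw [hcellk c hc]
          simp
        rw [hfind, ← List.head?_filter, Hac] at hrun
        rcases hdrop : (((List.range Xs.length).filter (pvFC Xs)).drop
            ((((List.range k).filter (pvFR Xs)).zip
              ((List.range Xs.length).filter (pvFC Xs))).length)) with _ | ⟨c0, rest⟩
        · -- no free column left: the row loop does nothing
          rw [hdrop] at hrun
          simp only [List.head?_nil] at hrun
          rw [hstate, hrun]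
          have hlen : ((List.range Xs.length).filter (pvFC Xs)).length ≤
              (((List.range k).filter (pvFR Xs)).zip
                ((List.range Xs.length).filter (pvFC Xs))).length := by
            have := List.drop_eq_nil_iff.mp hdrop
            omega
          have hzip : (((List.range (k+1)).filter (pvFR Xs)).zip
                ((List.range Xs.length).filter (pvFC Xs))) =
              (((List.range k).filter (pvFR Xs)).zip
                ((List.range Xs.length).filter (pvFC Xs))) := by
            rw [pv_filter_range_succ, if_pos hfrk]
            apply pv_zip_snoc_of_le
            rw [List.length_zip] at hlen
            omega
          exact ih (k+1) (by omega) g ar ac (by rw [hzip]; exact Hg)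
            (fun i hi => Har i (by omega)) (by rw [hzip]; exact Hac)
        · -- match the first free column c0
          rw [hdrop] at hrun
          simp only [List.head?_cons] at hrun
          rw [hstate, hrun]
          have hlenlt : (((List.range k).filter (pvFR Xs)).zip
                ((List.range Xs.length).filter (pvFC Xs))).length <
              ((List.range Xs.length).filter (pvFC Xs)).length := by
            by_contra hcon
            rw [List.drop_eq_nil_iff.mpr (by omega)] at hdrop
            simp at hdrop
          have hfrlen : (((List.range k).filter (pvFR Xs)).zip
                ((List.range Xs.length).filter (pvFC Xs))).length =
              ((List.range k).filter (pvFR Xs)).length := by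
            rw [List.length_zip] at hlenlt ⊢
            omega
          have hzip : (((List.range (k+1)).filter (pvFR Xs)).zip
                ((List.range Xs.length).filter (pvFC Xs))) =
              (((List.range k).filter (pvFR Xs)).zip
                ((List.range Xs.length).filter (pvFC Xs))) ++ [(k, c0)] := by
            rw [pv_filter_range_succ, if_pos hfrk]
            apply pv_zip_snoc_of_drop
            rw [← hfrlen]
            exact hdrop
          have hc0 : c0 ∈ (List.range Xs.length).filter (fun c => ac.getD c false) := by
            rw [Hac, hdrop]
            simp
          have hc0n : c0 ∈ List.range Xs.length := (List.mem_filter.mp hc0).1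
          have hrest : c0 ∉ rest := by
            have hnd : (((List.range Xs.length).filter (pvFC Xs)).drop
                ((((List.range k).filter (pvFR Xs)).zip
                  ((List.range Xs.length).filter (pvFC Xs))).length)).Nodup :=
              (List.Nodup.filter _ (List.nodup_range)).sublist (List.drop_sublist _ _)
            rw [hdrop] at hnd
            exact (List.nodup_cons.mp hnd).1
          apply ih (k+1) (by omega)
          · -- grid invariant
            rw [hzip]
            unfold pvZF
            rw [List.foldl_append, List.foldl_cons, List.foldl_nil]
            unfold pvZF at Hg
            rw [Hg]
          · -- avail_row invariant
            intro i hi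
            rw [pv_getD_set_ne ar k i false false (by omega)]
            exact Har i (by omega)
          · -- avail_col invariant
            rw [hzip, List.length_append, List.length_cons, List.length_nil]
            have hcong : ∀ c ∈ List.range Xs.length,
                ((ac.set c0 false).getD c false) = (!(c == c0) && ac.getD c false) := by
              intro c _
              by_cases hcc : c = c0
              · subst hcc
                rw [pv_getD_set_false_self]
                simp
              · rw [pv_getD_set_ne _ _ _ _ _ (Ne.symm hcc)]
                have hb : (c == c0) = false := beq_eq_false_iff_ne.mpr hcc
                rw [hb]
                simp
            rw [List.filter_congr hcong, ← List.filter_filter, Hac, hdrop]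
            rw [List.filter_cons]
            simp only [beq_self_eq_true, Bool.not_true, Bool.false_eq_true, if_false]
            rw [List.filter_eq_self.mpr (fun c hcr => by
              have hb : (c == c0) = false :=
                beq_eq_false_iff_ne.mpr (fun hh => hrest (hh ▸ hcr))
              rw [hb]
              rfl)]
            rw [← List.drop_drop, hdrop]
            rfl
      · -- row k is not free: the row loop does nothing
        have hfrk' : pvFR Xs k = false := by
          cases h : pvFR Xs k
          · rfl
          · exact absurd h hfrk
        have harK : ar.getD k false = false := by
          rw [Har k le_rfl, hfrk']
          simp
        rw [hstate, pv_p2_dead k (List.range Xs.length) g ar ac harK]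
        have hzip : (((List.range (k+1)).filter (pvFR Xs)) =
            ((List.range k).filter (pvFR Xs))) := by
          rw [pv_filter_range_succ, hfrk']
          simp
        exact ih (k+1) (by omega) g ar ac (by rw [hzip]; exact Hg)
          (fun i hi => Har i (by omega)) (by rw [hzip]; exact Hac)

-- ===== VERDICT (by name: the statement is the Claim_ definition above) =====
theorem solveXs_spec : Claim_equal_solveXs := by
  unfold Claim_equal_solveXs Spec_solveXs
  intro Xs _ _
  show ((List.range Xs.length).foldl (pvP2r Xs.length)
      ((List.range Xs.length).foldl (pvP1r Xs Xs.length)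
        ((List.range Xs.length).map (fun _ => (List.range Xs.length).map (fun _ => ".")),
         (List.range Xs.length).map (fun _ => true),
         (List.range Xs.length).map (fun _ => true)))).1 = solveXs_alt Xs
  rw [pv_s1_split, pv_G1_eq_B0]
  have hmain := pv_p2_main Xs Xs.length 0 (by omega) (pvB0 Xs) _ _
    (by simp [pvZF]) (fun i _ => pv_AR1_getD Xs i)
    (by
      simp only [List.range_zero, List.filter_nil, List.zip_nil_left, List.length_nil, List.drop_zero]
      apply List.filter_congr
      intro c hc
      rw [pv_AC1_getD,
        show decide (c < Xs.length) = true from decide_eq_true (List.mem_range.mp hc),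
        Bool.true_and])
  rw [← List.range_eq_range'] at hmain
  rw [hmain]
  -- now identify B's free lists with pvFR / pvFC
  show pvZF Xs _ = (((List.range Xs.length).filter (fun r =>
      (List.range Xs.length).all (fun c => !(pvCell (pvB0 Xs) r c == "x")))).zip
    ((List.range Xs.length).filter (fun c =>
      (List.range Xs.length).all (fun r => !(pvCell (pvB0 Xs) r c == "x"))))).foldl
      (fun g rc => pvSet2 g rc.1 rc.2 "x") (pvB0 Xs)
  have hrows : (List.range Xs.length).filter (fun r =>
      (List.range Xs.length).all (fun c => !(pvCell (pvB0 Xs) r c == "x"))) =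
      (List.range Xs.length).filter (pvFR Xs) := by
    apply List.filter_congr
    intro r hr
    unfold pvFR
    apply pv_all_congr
    intro c hc
    rw [pv_B0_cell Xs r c (List.mem_range.mp hr) (List.mem_range.mp hc)]
    by_cases h : pvCell Xs r c = "x" <;> simp [h]
  have hcols : (List.range Xs.length).filter (fun c =>
      (List.range Xs.length).all (fun r => !(pvCell (pvB0 Xs) r c == "x"))) =
      (List.range Xs.length).filter (pvFC Xs) := by
    apply List.filter_congr
    intro c hc
    unfold pvFC
    apply pv_all_congr
    intro r hr
    rw [pv_B0_cell Xs r c (List.mem_range.mp hr) (List.mem_range.mp hc)]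
    by_cases h : pvCell Xs r c = "x" <;> simp [h]
  rw [hrows, hcols]
  rfl
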